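-- pv_equiv track=rewrite | github.com/Bryce-jrs/Freeze-tag-problem | main.py | delete_rec_doublon
-- ===== SOURCE A (Python) =====
-- def delete_rec_doublon(list,tmp,i):
--     if (i<len(list)):
--         is_in=False
--         for j in range(len(tmp)):
--             if list[i][0]==tmp[j][0] or list[i][1]==tmp[j][1]:
--                 is_in=True
--         if is_in==False:
--             tmp.append(list[i])
--             return delete_rec_doublon(list,tmp,i+1)
--         else :
--             list.pop(i)
--             return delete_rec_doublon(list,tmp,i)
--     else : return list
-- ===== SOURCE B (Python) =====
-- def delete_rec_doublon(list, tmp, i):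
--     xs = {t[0] for t in tmp}
--     ys = {t[1] for t in tmp}
--     kept = []
--     for p in list[i:]:
--         if p[0] not in xs and p[1] not in ys:
--             kept.append(p)
--             tmp.append(p)
--             xs.add(p[0])
--             ys.add(p[1])
--     list[i:] = kept
--     return list
-- ===== Notes on version B (the rewrite author's own statement) =====
-- stated objective: alternative
-- what changed: A's tail recursion that rescans all of tmp for every element (and pops duplicates one at a time) is replaced by a single pass over list[i:] with two hash sets of already-seen first and second coordinates, followed by one slice assignment; both versions mutate list and tmp in place identically.
-- outside the precondition, e.g. on delete_rec_doublon([[1, 2], [3, 4]], [], -1): A returns [[1, 2]], B returns [[1, 2], [3, 4]]; on delete_rec_doublon([[1, 2]], [[1]], 5): A returns [[1, 2]], B raises IndexError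
import Mathlib
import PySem

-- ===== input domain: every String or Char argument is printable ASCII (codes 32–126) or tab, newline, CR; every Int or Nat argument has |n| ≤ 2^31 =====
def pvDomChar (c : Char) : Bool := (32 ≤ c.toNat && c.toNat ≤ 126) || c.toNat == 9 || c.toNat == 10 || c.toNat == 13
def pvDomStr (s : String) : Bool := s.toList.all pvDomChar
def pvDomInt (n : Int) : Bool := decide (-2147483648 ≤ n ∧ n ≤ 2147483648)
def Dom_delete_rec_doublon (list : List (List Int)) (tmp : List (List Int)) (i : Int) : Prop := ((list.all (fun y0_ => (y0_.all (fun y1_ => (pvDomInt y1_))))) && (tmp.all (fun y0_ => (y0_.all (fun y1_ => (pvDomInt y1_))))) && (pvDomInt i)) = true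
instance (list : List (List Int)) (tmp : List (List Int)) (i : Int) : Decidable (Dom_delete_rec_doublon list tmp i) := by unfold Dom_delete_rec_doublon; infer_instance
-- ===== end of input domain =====

-- B replaces A's tail recursion (which rescans all of tmp for each element and pops duplicates
-- one at a time) by a single pass over list[i:] keeping two sets of already-seen coordinates,
-- then one slice assignment. A and B both mutate `list` and `tmp` in place; the final contents
-- of both coincide, and the theorems below are about the returned value.

-- ===== PORT A =====
-- `for j in range(len(tmp))` reading tmp[j] is ported as a fold over tmp itself (indices are
-- always in range, tmp[j][0]/[1] via pyGet?).
def delete_rec_doublon (list : List (List Int)) (tmp : List (List Int)) (i : Int) : List (List Int) :=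
  if h : i < (list.length : Int) then
    let li := (PySem.List.pyGet? list i).getD []
    let is_in := tmp.foldl
      (fun b t =>
        if (PySem.List.pyGet? li 0 == PySem.List.pyGet? t 0)
           || (PySem.List.pyGet? li 1 == PySem.List.pyGet? t 1) then true else b) false
    if is_in = false then
      delete_rec_doublon list (tmp ++ [li]) (i + 1)
    else
      match h' : PySem.List.pop? list i with
      | some r => delete_rec_doublon r.2 tmp i
      | none => list   -- Python raises here (i < -len); outside Pre_
  else list
termination_by ((list.length : Int) - i).toNat
decreasing_by
  · omega
  · have := PySem.List.length_of_pop?_eq_some list h'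
    omega

-- ===== PORT B =====
-- t[0]/t[1]/p[0]/p[1] are ported as pyGet? (on Pre_ every row has ≥ 2 entries, so always some);
-- the two Python sets become PySem.Set (Option Int).
def delete_rec_doublon_alt (list : List (List Int)) (tmp : List (List Int)) (i : Int) : List (List Int) :=
  let xs : PySem.Set (Option Int) := PySem.Set.ofList (tmp.map (fun t => PySem.List.pyGet? t 0))
  let ys : PySem.Set (Option Int) := PySem.Set.ofList (tmp.map (fun t => PySem.List.pyGet? t 1))
  let res := (PySem.List.slice list (some i) none).foldl
    (fun (acc : List (List Int) × PySem.Set (Option Int) × PySem.Set (Option Int)) p =>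
      if !(acc.2.1.contains (PySem.List.pyGet? p 0)) && !(acc.2.2.contains (PySem.List.pyGet? p 1)) then
        (acc.1 ++ [p], PySem.Set.add acc.2.1 (PySem.List.pyGet? p 0),
         PySem.Set.add acc.2.2 (PySem.List.pyGet? p 1))
      else acc)
    ([], xs, ys)
  PySem.List.slice list none (some i) ++ res.1

-- ===== PRECONDITION & SPEC =====
-- Pre_ excludes (a) negative i, where A's value (when it returns one at all) comes from Python's
-- negative-index wraparound and A can also raise IndexError after pops shrink the list, and
-- (b) rows with fewer than 2 entries among tmp or among list[i:], on which the [0]/[1] indexing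
-- raises IndexError in A or in B.
def Pre_delete_rec_doublon (list : List (List Int)) (tmp : List (List Int)) (i : Int) : Prop :=
  0 ≤ i ∧ (∀ p ∈ list.drop i.toNat, 2 ≤ p.length) ∧ (∀ p ∈ tmp, 2 ≤ p.length)
instance (list : List (List Int)) (tmp : List (List Int)) (i : Int) : Decidable (Pre_delete_rec_doublon list tmp i) := by unfold Pre_delete_rec_doublon; infer_instance

def pvWitness_delete_rec_doublon : List (List Int) × List (List Int) × Int :=
  ([[1, 2], [1, 3], [4, 2], [5, 6]], [[7, 8]], 0)

def Spec_delete_rec_doublon (list : List (List Int)) (tmp : List (List Int)) (i : Int) (out : List (List Int)) : Prop := out = delete_rec_doublon_alt list tmp i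
instance (list : List (List Int)) (tmp : List (List Int)) (i : Int) (out : List (List Int)) : Decidable (Spec_delete_rec_doublon list tmp i out) := by unfold Spec_delete_rec_doublon; infer_instance

-- ===== CLAIM (what is proved, stated in full; the proofs are below) =====
def Claim_equal_delete_rec_doublon : Prop := ∀ (list : List (List Int)) (tmp : List (List Int)) (i : Int), Dom_delete_rec_doublon list tmp i → Pre_delete_rec_doublon list tmp i → Spec_delete_rec_doublon list tmp i (delete_rec_doublon list tmp i)

-- ===== LEMMAS AND PROOFS =====

-- The common mathematical core: the survivors of `rest` against accumulated rows `tmp`.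
def pvGo (rest tmp : List (List Int)) : List (List Int) :=
  match rest with
  | [] => []
  | p :: rs =>
    if tmp.any (fun t => (PySem.List.pyGet? p 0 == PySem.List.pyGet? t 0)
        || (PySem.List.pyGet? p 1 == PySem.List.pyGet? t 1)) then
      pvGo rs tmp
    else
      p :: pvGo rs (tmp ++ [p])

theorem pvA_eq (rest : List (List Int)) : ∀ tmp pre,
    delete_rec_doublon (pre ++ rest) tmp (pre.length : Int) = pre ++ pvGo rest tmp := by
  induction rest with
  | nil => intro tmp pre; rw [delete_rec_doublon]; simp [pvGo]
  | cons p rs ih =>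
    intro tmp pre
    rw [delete_rec_doublon]
    have hlen : (pre.length : Int) < ((pre ++ p :: rs).length : Int) := by simp
    rw [dif_pos hlen]
    simp only [PySem.List.pyGet?_append_length, Option.getD_some,
      PySem.List.foldl_if_true_eq, Bool.false_or]
    by_cases hc : tmp.any (fun t => (PySem.List.pyGet? p 0 == PySem.List.pyGet? t 0)
        || (PySem.List.pyGet? p 1 == PySem.List.pyGet? t 1)) = true
    · rw [if_neg (by simp [hc])]
      have hpop : PySem.List.pop? (pre ++ p :: rs) (pre.length : Int)
          = some ((pre ++ p :: rs)[pre.length]'(by simp), (pre ++ p :: rs).eraseIdx pre.length) :=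
        PySem.List.pop?_natCast _ _ (by simp)
      have hget : (pre ++ p :: rs)[pre.length]'(by simp) = p := by
        rw [List.getElem_append_right (by omega)]; simp
      have herase : (pre ++ p :: rs).eraseIdx pre.length = pre ++ rs := by
        rw [List.eraseIdx_append_of_length_le (by omega)]; simp
      rw [hget, herase] at hpop
      split
      · next r h' =>
        rw [hpop] at h'
        cases h'
        rw [ih tmp pre, pvGo, if_pos hc]
      · next h' => rw [hpop] at h'; cases h'
    · rw [if_pos (by simp_all)]
      have h1 : pre ++ p :: rs = (pre ++ [p]) ++ rs := by simp
      have h2 : (pre.length : Int) + 1 = (((pre ++ [p]).length : Nat) : Int) := by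
        simp
      rw [h1, h2, ih (tmp ++ [p]) (pre ++ [p])]
      rw [pvGo, if_neg hc]
      simp

theorem pvB_loop (rest : List (List Int)) : ∀ kept tmp,
    ((rest.foldl
      (fun (acc : List (List Int) × PySem.Set (Option Int) × PySem.Set (Option Int)) p =>
        if !(acc.2.1.contains (PySem.List.pyGet? p 0)) && !(acc.2.2.contains (PySem.List.pyGet? p 1)) then
          (acc.1 ++ [p], PySem.Set.add acc.2.1 (PySem.List.pyGet? p 0),
           PySem.Set.add acc.2.2 (PySem.List.pyGet? p 1))
        else acc)
      (kept, PySem.Set.ofList (tmp.map (fun t => PySem.List.pyGet? t 0)),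
             PySem.Set.ofList (tmp.map (fun t => PySem.List.pyGet? t 1)))).1)
    = kept ++ pvGo rest tmp := by
  induction rest with
  | nil => intro kept tmp; simp [pvGo]
  | cons p rs ih =>
    intro kept tmp
    rw [List.foldl_cons, pvGo]
    have hmem : ((PySem.Set.ofList (tmp.map (fun t => PySem.List.pyGet? t 0))).contains
          (PySem.List.pyGet? p 0)
        || (PySem.Set.ofList (tmp.map (fun t => PySem.List.pyGet? t 1))).contains
          (PySem.List.pyGet? p 1))
        = tmp.any (fun t => (PySem.List.pyGet? p 0 == PySem.List.pyGet? t 0)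
            || (PySem.List.pyGet? p 1 == PySem.List.pyGet? t 1)) := by
      rw [Bool.eq_iff_iff]
      simp only [Bool.or_eq_true, PySem.Set.contains_eq_listContains, List.contains_iff_mem,
        PySem.Set.mem_ofList, List.mem_map, List.any_eq_true, beq_iff_eq]
      constructor
      · rintro (⟨t, ht, he⟩ | ⟨t, ht, he⟩) <;> exact ⟨t, ht, by simp [he]⟩
      · rintro ⟨t, ht, he | he⟩
        · exact Or.inl ⟨t, ht, he.symm⟩
        · exact Or.inr ⟨t, ht, he.symm⟩
    have hcond : (!((PySem.Set.ofList (tmp.map (fun t => PySem.List.pyGet? t 0))).contains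
          (PySem.List.pyGet? p 0))
        && !((PySem.Set.ofList (tmp.map (fun t => PySem.List.pyGet? t 1))).contains
          (PySem.List.pyGet? p 1)))
        = !(tmp.any (fun t => (PySem.List.pyGet? p 0 == PySem.List.pyGet? t 0)
            || (PySem.List.pyGet? p 1 == PySem.List.pyGet? t 1))) := by
      rw [← Bool.not_or, hmem]
    have hadd : ∀ (k : Int), PySem.Set.ofList ((tmp ++ [p]).map (fun t => PySem.List.pyGet? t k))
        = PySem.Set.add (PySem.Set.ofList (tmp.map (fun t => PySem.List.pyGet? t k)))
            (PySem.List.pyGet? p k) := by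
      intro k
      rw [PySem.Set.ofList_eq_foldl, PySem.Set.ofList_eq_foldl, List.map_append,
        List.foldl_append]
      simp
    by_cases hc : tmp.any (fun t => (PySem.List.pyGet? p 0 == PySem.List.pyGet? t 0)
        || (PySem.List.pyGet? p 1 == PySem.List.pyGet? t 1)) = true
    · rw [hcond, if_neg (by simp [hc]), if_pos hc]
      exact ih kept tmp
    · rw [hcond, if_pos (by simp at hc ⊢; exact hc), if_neg hc]
      have := ih (kept ++ [p]) (tmp ++ [p])
      rw [hadd 0, hadd 1] at this
      simpa using this

-- ===== VERDICT (by name: the statement is the Claim_ definition above) =====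
theorem delete_rec_doublon_spec : Claim_equal_delete_rec_doublon := by
  intro list tmp i _ hpre
  obtain ⟨h0, -, -⟩ := hpre
  unfold Spec_delete_rec_doublon
  simp only [delete_rec_doublon_alt]
  rw [PySem.List.slice_from list h0, PySem.List.slice_to list h0, pvB_loop]
  by_cases hle : i.toNat ≤ list.length
  · have h2 : ((list.take i.toNat).length : Int) = i := by
      simp [List.length_take]; omega
    calc delete_rec_doublon list tmp i
        = delete_rec_doublon (list.take i.toNat ++ list.drop i.toNat) tmp
            ((list.take i.toNat).length : Int) := by
          rw [List.take_append_drop, h2]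
      _ = list.take i.toNat ++ pvGo (list.drop i.toNat) tmp := pvA_eq _ _ _
      _ = _ := by simp
  · have hd : list.drop i.toNat = [] := by
      rw [List.drop_eq_nil_iff]; omega
    have ht : list.take i.toNat = list := List.take_of_length_le (by omega)
    rw [delete_rec_doublon, dif_neg (by omega), hd, ht]
    simp [pvGo]
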